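-- pv_equiv track=rewrite | github.com/nmamano/MinCrossingsKnightsTour | Code/scripts/crossings.py | numCounts
-- ===== SOURCE A (Python) =====
-- def numCounts(move1, move2):
--     times = 0
--     A = (move1[0], move1[1])
--     B = (move1[2], move1[3])
--     C = (move2[0], move2[1])
--     D = (move2[2], move2[3])
--     columns = set()
--     if A[0] <= 1:
--         columns.add(A[1])
--     if B[0] <= 1:
--         columns.add(B[1])
--     if C[0] <= 1:
--         columns.add(C[1])
--     if D[0] <= 1:
--         columns.add(D[1])
--
--     for column in columns:
--         if (column + 1) in columns:
--             times += 1
--     return times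
-- ===== SOURCE B (Python) =====
-- def numCounts(move1, move2):
--     pts = [(move1[0], move1[1]), (move1[2], move1[3]),
--            (move2[0], move2[1]), (move2[2], move2[3])]
--     cols = sorted({c for r, c in pts if r <= 1})
--     return sum(1 for x, y in zip(cols, cols[1:]) if y == x + 1)
-- ===== Notes on version B (the rewrite author's own statement) =====
-- stated objective: alternative
-- what changed: B collects the distinct eligible columns (row <= 1), sorts them, and counts successor-adjacent pairs in one linear scan over consecutive elements, instead of A's per-element membership test of column+1 in a hash set.
import Mathlib
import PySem

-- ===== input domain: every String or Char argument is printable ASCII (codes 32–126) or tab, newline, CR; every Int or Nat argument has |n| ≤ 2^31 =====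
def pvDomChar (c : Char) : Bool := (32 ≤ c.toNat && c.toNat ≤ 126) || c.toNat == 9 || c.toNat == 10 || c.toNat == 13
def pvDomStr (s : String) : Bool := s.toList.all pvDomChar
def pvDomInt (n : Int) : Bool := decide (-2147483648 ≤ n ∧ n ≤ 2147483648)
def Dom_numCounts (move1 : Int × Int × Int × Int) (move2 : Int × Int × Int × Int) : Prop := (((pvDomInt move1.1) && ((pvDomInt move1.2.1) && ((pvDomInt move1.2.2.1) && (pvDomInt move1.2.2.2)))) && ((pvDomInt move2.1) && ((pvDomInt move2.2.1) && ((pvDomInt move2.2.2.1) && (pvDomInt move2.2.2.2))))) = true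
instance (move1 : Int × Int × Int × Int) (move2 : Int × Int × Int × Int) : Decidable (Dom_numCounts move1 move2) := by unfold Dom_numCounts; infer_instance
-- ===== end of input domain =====

-- B replaces A's per-element hash-set membership loop by sorting the distinct
-- eligible columns and counting successor-adjacent pairs in one linear scan (objective: alternative).

-- ===== PORT A =====
def numCounts (move1 : Int × Int × Int × Int) (move2 : Int × Int × Int × Int) : Int :=
  let A := (move1.1, move1.2.1)
  let B := (move1.2.2.1, move1.2.2.2)
  let C := (move2.1, move2.2.1)
  let D := (move2.2.2.1, move2.2.2.2)
  let columns : PySem.Set Int := PySem.Set.empty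
  let columns := if A.1 ≤ 1 then PySem.Set.add columns A.2 else columns
  let columns := if B.1 ≤ 1 then PySem.Set.add columns B.2 else columns
  let columns := if C.1 ≤ 1 then PySem.Set.add columns C.2 else columns
  let columns := if D.1 ≤ 1 then PySem.Set.add columns D.2 else columns
  -- 'for column in columns: if (column+1) in columns: times += 1' — order-independent sum over the set
  columns.foldl (fun times column => if PySem.Set.contains columns (column + 1) then times + 1 else times) 0

-- ===== PORT B =====
def numCounts_alt (move1 : Int × Int × Int × Int) (move2 : Int × Int × Int × Int) : Int :=
  let pts : List (Int × Int) :=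
    [(move1.1, move1.2.1), (move1.2.2.1, move1.2.2.2), (move2.1, move2.2.1), (move2.2.2.1, move2.2.2.2)]
  let cols := PySem.List.sorted (PySem.Set.ofList ((pts.filter (fun p => p.1 ≤ 1)).map (·.2))) (fun x => x) false
  ((cols.zip cols.tail).countP (fun p => p.2 == p.1 + 1) : Int)

-- ===== PRECONDITION & SPEC =====
def Spec_numCounts (move1 : Int × Int × Int × Int) (move2 : Int × Int × Int × Int) (out : Int) : Prop := out = numCounts_alt move1 move2
instance (move1 : Int × Int × Int × Int) (move2 : Int × Int × Int × Int) (out : Int) : Decidable (Spec_numCounts move1 move2 out) := by unfold Spec_numCounts; infer_instance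

-- ===== CLAIM (what is proved, stated in full; the proofs are below) =====
def Claim_equal_numCounts : Prop := ∀ (move1 : Int × Int × Int × Int) (move2 : Int × Int × Int × Int), Dom_numCounts move1 move2 → Spec_numCounts move1 move2 (numCounts move1 move2)

-- ===== LEMMAS AND PROOFS =====

-- On a strictly increasing list, an element's successor is present iff it is the very next element.
theorem countP_succ_mem_eq_adj (s : List Int) (hs : s.Pairwise (· < ·)) :
    s.countP (fun c => decide ((c + 1) ∈ s)) = (s.zip s.tail).countP (fun p => p.2 == p.1 + 1) := by
  induction s with
  | nil => simp
  | cons x rest ih =>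
    have hx : ∀ y ∈ rest, x < y := fun y hy => (List.pairwise_cons.1 hs).1 y hy
    have hrest : rest.Pairwise (· < ·) := (List.pairwise_cons.1 hs).2
    have hmem : ∀ c ∈ rest, ((c + 1) ∈ x :: rest) = ((c + 1) ∈ rest) := by
      intro c hc
      have : x < c := hx c hc
      simp [List.mem_cons]
      intro h; omega
    have hcong : rest.countP (fun c => decide ((c + 1) ∈ x :: rest))
        = rest.countP (fun c => decide ((c + 1) ∈ rest)) := by
      apply List.countP_congr
      intro c hc
      simp [hmem c hc]
    cases rest with
    | nil => simp
    | cons y rest' =>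
      have hxy : x < y := hx y (by simp)
      have hhead : ((x + 1) ∈ x :: y :: rest') ↔ (y = x + 1) := by
        constructor
        · intro h
          rcases List.mem_cons.1 h with h | h
          · omega
          · rcases List.mem_cons.1 h with h | h
            · omega
            · have := (List.pairwise_cons.1 hrest).1 _ h
              have := hx _ (List.mem_cons_of_mem y h)
              omega
        · intro h; subst h; simp
      rw [List.countP_cons, hcong, ih hrest]
      have hz : ((x :: y :: rest').zip (y :: rest')) = (x, y) :: ((y :: rest').zip rest') := rfl
      simp only [List.tail_cons]
      rw [hz, List.countP_cons]
      by_cases hy : y = x + 1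
      · simp [hy]
      · have : ¬ ((x + 1) ∈ x :: y :: rest') := fun h => hy (hhead.1 h)
        simp [hy, this]

-- the two programs build the same distinct-column list (A by conditional adds, B by ofList of the filtered list)
theorem cols_eq (move1 move2 : Int × Int × Int × Int) :
    (let columns : PySem.Set Int := PySem.Set.empty
     let columns := if move1.1 ≤ 1 then PySem.Set.add columns move1.2.1 else columns
     let columns := if move1.2.2.1 ≤ 1 then PySem.Set.add columns move1.2.2.2 else columns
     let columns := if move2.1 ≤ 1 then PySem.Set.add columns move2.2.1 else columns
     if move2.2.2.1 ≤ 1 then PySem.Set.add columns move2.2.2.2 else columns)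
    = PySem.Set.ofList ((([(move1.1, move1.2.1), (move1.2.2.1, move1.2.2.2), (move2.1, move2.2.1), (move2.2.2.1, move2.2.2.2)] : List (Int × Int)).filter (fun p => p.1 ≤ 1)).map (·.2)) := by
  by_cases h1 : move1.1 ≤ 1 <;> by_cases h2 : move1.2.2.1 ≤ 1 <;>
    by_cases h3 : move2.1 ≤ 1 <;> by_cases h4 : move2.2.2.1 ≤ 1 <;>
      simp [PySem.Set.ofList, PySem.Set.empty, h1, h2, h3, h4, List.filter]

-- ===== VERDICT (by name: the statement is the Claim_ definition above) =====
theorem numCounts_spec : Claim_equal_numCounts := by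
  intro move1 move2 _
  unfold Spec_numCounts numCounts numCounts_alt
  simp only []
  rw [cols_eq move1 move2]
  set S := PySem.Set.ofList ((([(move1.1, move1.2.1), (move1.2.2.1, move1.2.2.2), (move2.1, move2.2.1), (move2.2.2.1, move2.2.2.2)] : List (Int × Int)).filter (fun p => p.1 ≤ 1)).map (·.2)) with hS
  set s := PySem.List.sorted S (fun x => x) false with hs
  have hperm : s.Perm S := PySem.List.sorted_perm S _ _
  have hpw : s.Pairwise (· < ·) := PySem.List.sorted_ofList_pairwise_lt _
  have hcontains : ∀ c : Int, PySem.Set.contains S (c + 1) = decide ((c + 1) ∈ s) := by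
    intro c
    simp [PySem.Set.contains, hperm.mem_iff]
  calc S.foldl (fun times column => if PySem.Set.contains S (column + 1) then times + 1 else times) 0
      = (0 : Int) + (S.countP (fun c => PySem.Set.contains S (c + 1)) : Int) :=
        PySem.List.foldl_if_add_one _ S 0
    _ = (s.countP (fun c => decide ((c + 1) ∈ s)) : Int) := by
        rw [zero_add, hperm.countP_eq]
        congr 1
        apply List.countP_congr
        intro c _
        simp [PySem.Set.contains, hperm.mem_iff]
    _ = ((s.zip s.tail).countP (fun p => p.2 == p.1 + 1) : Int) := by
        rw [countP_succ_mem_eq_adj s hpw]
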